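-- pv_equiv track=rewrite | github.com/Pororo-Study/Programmers-High-Kit | PCCP-모의고사/1회/[PCCP 모의고사 1] 1번_현지연.py | solution
-- ===== SOURCE A (Python) =====
-- def solution(input_string):
--     answer = []
--     dic = dict()    # 딕셔너리 생성 (key는 알파벳, value는 인덱스)
--
--     for i in range(len(input_string)):
--         x = input_string[i]
--
--         if x not in dic:        # 처음 나타난 알파벳은 인덱스 저장
--             dic[x] = i
--         else:
--             if dic[x] == -1:        # 이미 외톨이 알파벳이 되었다면, 넘어감
--                 continue
--             elif i - dic[x] > 1:    # 이전 위치와 떨어져 있다면, 정답배열에 추가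
--                 dic[x] = -1
--                 answer.append(x)
--             else:                   # 하나의 덩어리로 뭉쳐져있다면, 인덱스 업데이트
--                 dic[x] = i
--
--     if not answer:  # 배열이 비어있다면 "N"리턴
--         return "N"
--     else:           # 알파벳 정렬 후 str로 바꿔서 리턴
--         answer.sort()
--         return "".join(answer)
-- ===== SOURCE B (Python) =====
-- def solution(input_string):
--     info = {}    # char -> (first index, last index, count)
--     for i, x in enumerate(input_string):
--         if x in info:
--             first, last, count = info[x]
--             info[x] = (first, i, count + 1)
--         else:
--             info[x] = (i, i, 1)
--     lonely = [x for x, (first, last, count) in info.items()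
--               if last - first + 1 != count]
--     if not lonely:
--         return "N"
--     return "".join(sorted(lonely))
-- ===== Notes on version B (the rewrite author's own statement) =====
-- stated objective: alternative
-- what changed: Replaces A's incremental adjacent-gap state machine (last-index-or-(-1) sentinel dict plus append-on-gap list) with a one-pass first/last/count aggregate per character and a closed-form contiguity test last-first+1 != count applied to the distinct characters afterwards.
import Mathlib
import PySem

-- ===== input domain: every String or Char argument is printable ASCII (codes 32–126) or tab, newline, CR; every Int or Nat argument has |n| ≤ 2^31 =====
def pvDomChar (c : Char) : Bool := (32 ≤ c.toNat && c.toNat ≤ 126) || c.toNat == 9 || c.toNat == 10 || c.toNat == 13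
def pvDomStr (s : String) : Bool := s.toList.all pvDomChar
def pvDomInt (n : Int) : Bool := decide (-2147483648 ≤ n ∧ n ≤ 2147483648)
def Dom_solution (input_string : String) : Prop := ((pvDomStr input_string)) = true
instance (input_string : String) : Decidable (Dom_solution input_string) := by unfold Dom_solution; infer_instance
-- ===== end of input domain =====

-- B replaces A's incremental adjacent-gap state machine with per-character first/last/count
-- aggregates and the closed-form contiguity test last-first+1 ≠ count (objective: alternative).

-- ===== PORT A =====
-- one iteration of A's 'for i in range(len(input_string))' loop body (state = (dic, answer))
def stepA (st : PySem.Dict Char Int × List Char) (p : Int × Char) :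
    PySem.Dict Char Int × List Char :=
  match st.1.get? p.2 with
  | none => (st.1.insert p.2 p.1, st.2)                                   -- x not in dic
  | some j =>
    if j = -1 then st                                                     -- already lonely
    else if p.1 - j > 1 then (st.1.insert p.2 (-1), st.2 ++ [p.2])        -- gap: mark & append
    else (st.1.insert p.2 p.1, st.2)                                      -- adjacent: update index

def solution (input_string : String) : String :=
  let cs := input_string.toList
  let res := (PySem.List.pyRange 0 (PySem.Str.len input_string) 1).foldl
      (fun st i => stepA st (i, PySem.List.pyGetD cs i ' ')) (PySem.Dict.empty, [])
  if res.2 = [] then "N"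
  else String.ofList (PySem.Chars.join []
      ((PySem.List.sorted res.2 (fun c => c) false).map (fun c => [c])))  -- answer.sort(); "".join

-- ===== PORT B =====
-- one iteration of B's enumerate loop (info : char -> (first, last, count))
def stepB (d : PySem.Dict Char (Int × Int × Int)) (p : Int × Char) :
    PySem.Dict Char (Int × Int × Int) :=
  match d.get? p.2 with
  | some (f, _, c) => d.insert p.2 (f, p.1, c + 1)
  | none => d.insert p.2 (p.1, p.1, 1)

def solution_alt (input_string : String) : String :=
  let info := (PySem.List.enumerate input_string.toList 0).foldl stepB PySem.Dict.empty
  let lonely := (info.items.filter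
      (fun q => decide (q.2.2.1 - q.2.1 + 1 ≠ q.2.2.2))).map (·.1)
  if lonely = [] then "N"
  else String.ofList (PySem.Chars.join []
      ((PySem.List.sorted lonely (fun c => c) false).map (fun c => [c]))) -- "".join(sorted(lonely))

-- ===== PRECONDITION & SPEC =====
def Spec_solution (input_string : String) (out : String) : Prop := out = solution_alt input_string
instance (input_string : String) (out : String) : Decidable (Spec_solution input_string out) := by unfold Spec_solution; infer_instance

-- ===== CLAIM (what is proved, stated in full; the proofs are below) =====
def Claim_equal_solution : Prop := ∀ (input_string : String), Dom_solution input_string → Spec_solution input_string (solution input_string)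

-- ===== LEMMAS AND PROOFS =====

-- Invariant tying A's (dic, answer) state to B's first/last/count aggregates after processing
-- any index-sorted, nonnegative-index prefix ps of enumerate(input_string).
theorem inv_foldAB (ps : List (Int × Char))
    (hp : ps.Pairwise (fun p q => p.1 < q.1)) (hnn : ∀ p ∈ ps, 0 ≤ p.1) :
    (ps.foldl stepA (PySem.Dict.empty, [])).1.keys.Nodup ∧
    (ps.foldl stepB PySem.Dict.empty).keys.Nodup ∧
    (ps.foldl stepA (PySem.Dict.empty, [])).2.Nodup ∧
    (∀ x, x ∈ (ps.foldl stepA (PySem.Dict.empty, [])).2 ↔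
      (ps.foldl stepA (PySem.Dict.empty, [])).1.get? x = some (-1)) ∧
    (∀ x, (ps.foldl stepA (PySem.Dict.empty, [])).1.get? x = none ↔
      (ps.foldl stepB PySem.Dict.empty).get? x = none) ∧
    (∀ x f l c, (ps.foldl stepB PySem.Dict.empty).get? x = some (f, l, c) →
      (l, x) ∈ ps ∧ f ≤ l ∧ 1 ≤ c ∧ c ≤ l - f + 1 ∧
      (if c = l - f + 1 then (ps.foldl stepA (PySem.Dict.empty, [])).1.get? x = some l
       else (ps.foldl stepA (PySem.Dict.empty, [])).1.get? x = some (-1)))    := by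
  induction ps using List.reverseRecOn with
  | nil =>
      refine ⟨?_, ?_, ?_, ?_, ?_, ?_⟩ <;>
        simp [PySem.Dict.get?_empty, PySem.Dict.keys_empty]
  | append_singleton ps p ih =>
      rcases p with ⟨i, x⟩
      rw [List.pairwise_append] at hp
      obtain ⟨hp1, _, hltq⟩ := hp
      have hlt : ∀ q ∈ ps, q.1 < i := by
        intro q hq
        simpa using hltq q hq (i, x) (by simp)
      have hnn' : ∀ p ∈ ps, 0 ≤ p.1 := fun p hp => hnn p (List.mem_append_left _ hp)
      have hi0 : 0 ≤ i := by simpa using hnn (i, x) (by simp)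
      obtain ⟨hAk, hBk, hansN, hmem, hnone, hent⟩ := ih hp1 hnn'
      set a := ps.foldl stepA (PySem.Dict.empty, []) with hadef
      set b := ps.foldl stepB PySem.Dict.empty with hbdef
      have hA : (ps ++ [(i, x)]).foldl stepA (PySem.Dict.empty, []) = stepA a (i, x) := by
        rw [List.foldl_append]; rfl
      have hB : (ps ++ [(i, x)]).foldl stepB PySem.Dict.empty = stepB b (i, x) := by
        rw [List.foldl_append]; rfl
      rw [hA, hB]
      cases hax : a.1.get? x with
      | none =>
          have hbx : b.get? x = none := (hnone x).mp hax
          simp only [stepA, stepB, hax, hbx]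
          refine ⟨PySem.Dict.nodup_keys_insert _ _ _ hAk,
                  PySem.Dict.nodup_keys_insert _ _ _ hBk, hansN, ?_, ?_, ?_⟩
          · intro y
            rw [PySem.Dict.get?_insert]
            by_cases hyx : y = x
            · subst hyx
              rw [if_pos rfl]
              constructor
              · intro hy
                have := (hmem y).mp hy
                rw [hax] at this
                cases this
              · intro h
                have := Option.some.inj h
                omega
            · rw [if_neg hyx]; exact hmem y
          · intro y
            rw [PySem.Dict.get?_insert, PySem.Dict.get?_insert]
            by_cases hyx : y = x
            · simp [hyx]
            · rw [if_neg hyx, if_neg hyx]; exact hnone y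
          · intro y f l c hby
            rw [PySem.Dict.get?_insert] at hby
            by_cases hyx : y = x
            · rw [if_pos hyx] at hby
              subst hyx
              simp only [Option.some.injEq, Prod.mk.injEq] at hby
              obtain ⟨rfl, rfl, rfl⟩ := hby
              refine ⟨by simp, le_refl _, le_refl _, by omega, ?_⟩
              rw [if_pos (by omega)]
              rw [PySem.Dict.get?_insert, if_pos rfl]
            · rw [if_neg hyx] at hby
              obtain ⟨h1, h2, h3, h4, h5⟩ := hent y f l c hby
              refine ⟨List.mem_append_left _ h1, h2, h3, h4, ?_⟩
              rw [PySem.Dict.get?_insert]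
              simp only [if_neg hyx]
              exact h5
      | some j =>
          have hbne : ¬ b.get? x = none := by
            intro h
            rw [← hnone x] at h
            rw [hax] at h
            cases h
          obtain ⟨⟨f0, l0, c0⟩, hbx⟩ := Option.ne_none_iff_exists'.mp hbne
          obtain ⟨hl0m, hfl0, hc01, hc0le, hif0⟩ := hent x f0 l0 c0 hbx
          have hl0i : l0 < i := hlt _ hl0m
          have hl00 : 0 ≤ l0 := hnn' _ hl0m
          by_cases hj : j = -1
          · -- A already marked x lonely: A's state unchanged, B keeps a broken run
            have hc0ne : ¬ c0 = l0 - f0 + 1 := by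
              intro hc
              rw [if_pos hc, hax] at hif0
              have := Option.some.inj hif0
              omega
            simp only [stepA, stepB, hax, hbx, if_pos hj]
            refine ⟨hAk, PySem.Dict.nodup_keys_insert _ _ _ hBk, hansN, hmem, ?_, ?_⟩
            · intro y
              rw [PySem.Dict.get?_insert]
              by_cases hyx : y = x
              · subst hyx
                simp [hax]
              · rw [if_neg hyx]; exact hnone y
            · intro y f l c hby
              rw [PySem.Dict.get?_insert] at hby
              by_cases hyx : y = x
              · rw [if_pos hyx] at hby
                subst hyx
                simp only [Option.some.injEq, Prod.mk.injEq] at hby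
                obtain ⟨rfl, rfl, rfl⟩ := hby
                refine ⟨by simp, by omega, by omega, by omega, ?_⟩
                rw [if_neg (by omega)]
                rw [hax, hj]
              · rw [if_neg hyx] at hby
                obtain ⟨h1, h2, h3, h4, h5⟩ := hent y f l c hby
                exact ⟨List.mem_append_left _ h1, h2, h3, h4, h5⟩
          · -- x's run is intact so far: dic[x] = last index l0
            have hc0eq : c0 = l0 - f0 + 1 := by
              by_contra hc
              rw [if_neg hc, hax] at hif0
              have := Option.some.inj hif0
              omega
            have hjl : j = l0 := by
              rw [if_pos hc0eq, hax] at hif0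
              exact Option.some.inj hif0
            have hxnot : x ∉ a.2 := by
              intro h
              have := (hmem x).mp h
              rw [hax] at this
              have := Option.some.inj this
              omega
            by_cases hgap : i - j > 1
            · -- gap: A marks x lonely and appends it; B's aggregate turns non-contiguous
              simp only [stepA, stepB, hax, hbx, if_neg hj, if_pos hgap]
              refine ⟨PySem.Dict.nodup_keys_insert _ _ _ hAk,
                      PySem.Dict.nodup_keys_insert _ _ _ hBk, ?_, ?_, ?_, ?_⟩
              · refine List.Nodup.append hansN (List.nodup_singleton x) ?_
                intro y hy hz
                simp only [List.mem_singleton] at hz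
                subst hz
                exact hxnot hy
              · intro y
                rw [PySem.Dict.get?_insert]
                by_cases hyx : y = x
                · subst hyx; simp
                · rw [if_neg hyx]
                  constructor
                  · intro h
                    rcases List.mem_append.mp h with h | h
                    · exact (hmem y).mp h
                    · simp at h; exact absurd h hyx
                  · intro h
                    exact List.mem_append_left _ ((hmem y).mpr h)
              · intro y
                rw [PySem.Dict.get?_insert, PySem.Dict.get?_insert]
                by_cases hyx : y = x
                · simp [hyx]
                · rw [if_neg hyx, if_neg hyx]; exact hnone y
              · intro y f l c hby
                rw [PySem.Dict.get?_insert] at hby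
                by_cases hyx : y = x
                · rw [if_pos hyx] at hby
                  subst hyx
                  simp only [Option.some.injEq, Prod.mk.injEq] at hby
                  obtain ⟨rfl, rfl, rfl⟩ := hby
                  refine ⟨by simp, by omega, by omega, by omega, ?_⟩
                  rw [if_neg (by omega)]
                  rw [PySem.Dict.get?_insert, if_pos rfl]
                · rw [if_neg hyx] at hby
                  obtain ⟨h1, h2, h3, h4, h5⟩ := hent y f l c hby
                  refine ⟨List.mem_append_left _ h1, h2, h3, h4, ?_⟩
                  rw [PySem.Dict.get?_insert]
                  simp only [if_neg hyx]
                  exact h5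
            · -- adjacent: A updates dic[x] := i; B extends the contiguous run
              simp only [stepA, stepB, hax, hbx, if_neg hj, if_neg hgap]
              refine ⟨PySem.Dict.nodup_keys_insert _ _ _ hAk,
                      PySem.Dict.nodup_keys_insert _ _ _ hBk, hansN, ?_, ?_, ?_⟩
              · intro y
                rw [PySem.Dict.get?_insert]
                by_cases hyx : y = x
                · subst hyx
                  rw [if_pos rfl]
                  constructor
                  · intro hy; exact absurd hy hxnot
                  · intro h
                    have := Option.some.inj h
                    omega
                · rw [if_neg hyx]; exact hmem y
              · intro y
                rw [PySem.Dict.get?_insert, PySem.Dict.get?_insert]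
                by_cases hyx : y = x
                · simp [hyx]
                · rw [if_neg hyx, if_neg hyx]; exact hnone y
              · intro y f l c hby
                rw [PySem.Dict.get?_insert] at hby
                by_cases hyx : y = x
                · rw [if_pos hyx] at hby
                  subst hyx
                  simp only [Option.some.injEq, Prod.mk.injEq] at hby
                  obtain ⟨rfl, rfl, rfl⟩ := hby
                  refine ⟨by simp, by omega, by omega, by omega, ?_⟩
                  rw [if_pos (by omega)]
                  rw [PySem.Dict.get?_insert, if_pos rfl]
                · rw [if_neg hyx] at hby
                  obtain ⟨h1, h2, h3, h4, h5⟩ := hent y f l c hby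
                  refine ⟨List.mem_append_left _ h1, h2, h3, h4, ?_⟩
                  rw [PySem.Dict.get?_insert]
                  simp only [if_neg hyx]
                  exact h5


-- ===== VERDICT (by name: the statement is the Claim_ definition above) =====
theorem solution_spec : Claim_equal_solution := by
  intro s _
  simp only [Spec_solution, solution, solution_alt]
  have hmapE : (PySem.List.pyRange 0 (PySem.Str.len s) 1).map
      (fun j => (j, PySem.List.pyGetD s.toList j ' ')) = PySem.List.enumerate s.toList 0 := by
    simpa [PySem.Str.len_eq] using
      (PySem.List.enumerate_eq_map_pyRange (xs := s.toList) (d := ' ')).symm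
  have hfoldA : (PySem.List.pyRange 0 (PySem.Str.len s) 1).foldl
      (fun st i => stepA st (i, PySem.List.pyGetD s.toList i ' ')) (PySem.Dict.empty, []) =
      (PySem.List.enumerate s.toList 0).foldl stepA (PySem.Dict.empty, []) := by
    rw [← hmapE, List.foldl_map]
  rw [hfoldA]
  set ps := PySem.List.enumerate s.toList 0 with hps
  have hnn : ∀ p ∈ ps, 0 ≤ p.1 := by
    intro p hp
    rw [hps, PySem.List.mem_enumerate_iff] at hp
    obtain ⟨k, hk, rfl⟩ := hp
    simp
  obtain ⟨hAk, hBk, hansN, hmem, hnone, hent⟩ :=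
    inv_foldAB ps (PySem.List.pairwise_lt_enumerate _ _) hnn
  set a := ps.foldl stepA (PySem.Dict.empty, []) with ha
  set b := ps.foldl stepB PySem.Dict.empty with hb
  set lonely := (b.items.filter (fun q => decide (q.2.2.1 - q.2.1 + 1 ≠ q.2.2.2))).map (·.1) with hl
  have hmemiff : ∀ x, x ∈ lonely ↔ x ∈ a.2 := by
    intro x
    constructor
    · intro hx
      rcases List.mem_map.mp hx with ⟨⟨y, f, l, c⟩, hq, rfl⟩
      rcases List.mem_filter.mp hq with ⟨hqi, hqc⟩
      have hget : b.get? y = some (f, l, c) := PySem.Dict.get?_of_mem_items _ hqi hBk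
      obtain ⟨hlm, hfl, hc1, hcle, hif⟩ := hent y f l c hget
      have hc : l - f + 1 ≠ c := by simpa using hqc
      rw [if_neg (by omega : ¬ c = l - f + 1)] at hif
      exact (hmem y).mpr hif
    · intro hx
      have hav := (hmem x).mp hx
      have hbs : b.get? x ≠ none := by
        intro h
        rw [← hnone] at h
        rw [h] at hav
        simp at hav
      obtain ⟨⟨f, l, c⟩, hbq⟩ := Option.ne_none_iff_exists'.mp hbs
      obtain ⟨hlm, hfl, hc1, hcle, hif⟩ := hent x f l c hbq
      have hl0 : 0 ≤ l := hnn _ hlm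
      have hcne : ¬ c = l - f + 1 := by
        intro hceq
        rw [if_pos hceq, hav] at hif
        have hlneg : l = -1 := by simpa using hif.symm
        omega
      exact List.mem_map.mpr ⟨(x, (f, l, c)),
        List.mem_filter.mpr ⟨PySem.Dict.mem_items_of_get?_eq_some _ hbq, by simp; omega⟩, rfl⟩
  have hlonelyN : lonely.Nodup := by
    have hsub : lonely.Sublist b.keys := by
      rw [hl]
      simp only [PySem.Dict.keys]
      exact List.filter_sublist.map _
    exact hBk.sublist hsub
  have hperm : lonely.Perm a.2 := (List.perm_ext_iff_of_nodup hlonelyN hansN).mpr hmemiff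
  by_cases hempty : a.2 = []
  · have hle : lonely = [] := by
      rw [hempty] at hperm
      exact hperm.eq_nil
    simp [hempty, hle]
  · have hlne : ¬ lonely = [] := by
      intro h
      rw [h] at hperm
      exact hempty hperm.symm.eq_nil
    simp only [if_neg hempty, if_neg hlne]
    rw [PySem.List.sorted_eq_sorted_of_perm a.2 lonely (fun c => c) (fun _ _ h => h) hperm.symm]
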